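-- pv_equiv track=rewrite | github.com/thealper2/codewars-solutions | 7-kyu/speed_limit.py | speed_limit
-- ===== SOURCE A (Python) =====
-- def speed_limit(speed, signals):
--     result = 0
--     for limit in signals:
--         excess = speed - limit
--         if 10 <= excess <= 19:
--             result += 100
--         elif 20 <= excess <= 29:
--             result += 250
--         elif excess >= 30:
--             result += 500
--
--     return result
-- ===== SOURCE B (Python) =====
-- def speed_limit(speed, signals):
--     # marginal-increment decomposition: fine(e) = 100*[e>=10] + 150*[e>=20] + 250*[e>=30]
--     c10 = sum(1 for limit in signals if limit <= speed - 10)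
--     c20 = sum(1 for limit in signals if limit <= speed - 20)
--     c30 = sum(1 for limit in signals if limit <= speed - 30)
--     return 100 * c10 + 150 * c20 + 250 * c30
-- ===== Notes on version B (the rewrite author's own statement) =====
-- stated objective: alternative
-- what changed: Replaces the per-signal if/elif fine ladder by three whole-list counting passes over threshold crossings, using the marginal decomposition fine = 100*[excess>=10] + 150*[excess>=20] + 250*[excess>=30].
import Mathlib
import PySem

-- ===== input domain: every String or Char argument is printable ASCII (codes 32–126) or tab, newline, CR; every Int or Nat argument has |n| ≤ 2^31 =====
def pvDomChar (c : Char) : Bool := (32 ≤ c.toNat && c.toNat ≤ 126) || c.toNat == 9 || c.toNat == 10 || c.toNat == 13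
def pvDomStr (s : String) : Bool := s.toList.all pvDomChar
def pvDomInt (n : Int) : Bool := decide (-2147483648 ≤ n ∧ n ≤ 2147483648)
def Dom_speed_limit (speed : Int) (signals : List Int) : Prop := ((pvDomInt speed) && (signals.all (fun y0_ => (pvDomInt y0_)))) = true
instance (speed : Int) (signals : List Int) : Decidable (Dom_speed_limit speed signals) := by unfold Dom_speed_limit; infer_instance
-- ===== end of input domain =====

-- B replaces A's per-signal if/elif fine ladder by three counting passes over threshold crossings (marginal-increment decomposition; same cost).

-- ===== PORT A =====
def speed_limit (speed : Int) (signals : List Int) : Int :=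
  signals.foldl (fun result limit =>
    let excess := speed - limit
    if 10 ≤ excess ∧ excess ≤ 19 then result + 100
    else if 20 ≤ excess ∧ excess ≤ 29 then result + 250
    else if 30 ≤ excess then result + 500
    else result) 0

-- ===== PORT B =====
def speed_limit_alt (speed : Int) (signals : List Int) : Int :=
  let c10 : Int := signals.countP (fun limit => decide (limit ≤ speed - 10))
  let c20 : Int := signals.countP (fun limit => decide (limit ≤ speed - 20))
  let c30 : Int := signals.countP (fun limit => decide (limit ≤ speed - 30))
  100 * c10 + 150 * c20 + 250 * c30

-- ===== PRECONDITION & SPEC =====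
def Spec_speed_limit (speed : Int) (signals : List Int) (out : Int) : Prop := out = speed_limit_alt speed signals
instance (speed : Int) (signals : List Int) (out : Int) : Decidable (Spec_speed_limit speed signals out) := by unfold Spec_speed_limit; infer_instance

-- ===== CLAIM (what is proved, stated in full; the proofs are below) =====
def Claim_equal_speed_limit : Prop := ∀ (speed : Int) (signals : List Int), Dom_speed_limit speed signals → Spec_speed_limit speed signals (speed_limit speed signals)

-- ===== LEMMAS AND PROOFS =====

-- A's fold with any accumulator, related to B's three counts
theorem fold_counts (speed : Int) (signals : List Int) (acc : Int) :
    signals.foldl (fun result limit =>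
      let excess := speed - limit
      if 10 ≤ excess ∧ excess ≤ 19 then result + 100
      else if 20 ≤ excess ∧ excess ≤ 29 then result + 250
      else if 30 ≤ excess then result + 500
      else result) acc
    = acc + 100 * (signals.countP (fun limit => decide (limit ≤ speed - 10)) : Int)
          + 150 * (signals.countP (fun limit => decide (limit ≤ speed - 20)) : Int)
          + 250 * (signals.countP (fun limit => decide (limit ≤ speed - 30)) : Int) := by
  induction signals generalizing acc with
  | nil => simp
  | cons l t ih =>
    simp only [List.foldl_cons, List.countP_cons, decide_eq_true_eq, ih]
    by_cases ha : l ≤ speed - 10 <;>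
      by_cases hb : l ≤ speed - 20 <;>
      by_cases hc : l ≤ speed - 30 <;>
      · simp only [ha, hb, hc, ite_true, ite_false]
        split_ifs <;> push_cast <;> omega

-- ===== VERDICT (by name: the statement is the Claim_ definition above) =====
theorem speed_limit_spec : Claim_equal_speed_limit := by
  intro speed signals _
  unfold Spec_speed_limit speed_limit speed_limit_alt
  rw [fold_counts]
  ring
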